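-- pv_equiv track=rewrite | github.com/KungCheops/aigrader | examples/assignment-03/assignment-03-R-00524525480438.py | longest_common_list
-- ===== SOURCE A (Python) =====
-- def sublist(s_list):
--     for i in range(0, len(s_list)):
--         for j in range(i+1, len(s_list)):
--             if s_list[j] >= s_list[j-1]:
--                 yield s_list[i:j+1]
--             else:
--                 break
--
-- def longest_common_list(s_list):
--     sublists_original = [l for l in sublist(s_list)]
--     sublists_reversed = [l for l in sublist(s_list[::-1])]
--     common_sublists = [l1 for l1 in sublists_original for l2 in sublists_reversed if l1 == l2]
--     longest_length = 0
--     longest_sublist = []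
--     for l in common_sublists:
--         if len(l) > longest_length:
--             longest_length = len(l)
--             longest_sublist = l
--     return longest_sublist
-- ===== SOURCE B (Python) =====
-- def _occurs(seg, s):
--     L = len(seg)
--     for k in range(len(s) - L + 1):
--         if s[k:k + L] == seg:
--             return True
--     return False
--
-- def longest_common_list(s_list):
--     n = len(s_list)
--     best = []
--     for i in range(n):
--         j = i + 1
--         while j < n and s_list[j] >= s_list[j - 1] and _occurs(s_list[i:j + 1][::-1], s_list):
--             j += 1
--         if j - i > max(len(best), 1):
--             best = s_list[i:j]
--     return best
-- ===== Notes on version B (the rewrite author's own statement) =====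
-- stated objective: faster
-- what changed: Instead of materialising every ascending sublist of the list and of its reversal and intersecting them in a quadratic cross product, B does one greedy pass over start positions, extending each window while it stays non-decreasing and its reverse still occurs in the original list (sound because commonality of a window is prefix-closed), so no sublists of the reversal are ever enumerated and no collections are built.
import Mathlib
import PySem

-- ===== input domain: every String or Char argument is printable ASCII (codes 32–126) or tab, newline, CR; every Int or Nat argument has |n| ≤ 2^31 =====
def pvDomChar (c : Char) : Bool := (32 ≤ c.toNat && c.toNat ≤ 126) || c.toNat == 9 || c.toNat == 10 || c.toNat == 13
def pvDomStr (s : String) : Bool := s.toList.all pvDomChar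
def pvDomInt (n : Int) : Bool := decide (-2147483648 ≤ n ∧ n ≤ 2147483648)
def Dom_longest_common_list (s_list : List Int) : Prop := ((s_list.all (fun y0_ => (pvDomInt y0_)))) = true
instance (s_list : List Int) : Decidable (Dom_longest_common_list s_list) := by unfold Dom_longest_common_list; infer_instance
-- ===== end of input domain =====

-- B replaces A's materialise-and-intersect (all ascending sublists of the list and of its
-- reversal, a quadratic cross product, then a max scan) with one greedy pass over start
-- positions, extending each window while it stays non-decreasing and its reverse still
-- occurs in the original list; objective: faster on run-heavy inputs.

-- ===== PORT A =====
-- inner 'for j' loop of the generator `sublist`: while j in range and s[j] >= s[j-1], yield s[i:j+1];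
-- indices are non-negative and in range, so s[j] is List.getD, and the slice s[i:j+1] is
-- (drop i).take (j+1-i) (exact for natural bounds: PySem.List.slice_natCast)
def subAuxA (s : List Int) (i j : Nat) : List (List Int) :=
  if _h : j < s.length then
    if s.getD (j-1) 0 ≤ s.getD j 0 then
      ((s.drop i).take (j+1-i)) :: subAuxA s i (j+1)
    else []
  else []
termination_by s.length - j

-- `[l for l in sublist(s)]`
def sublistA (s : List Int) : List (List Int) :=
  (List.range s.length).flatMap (fun i => subAuxA s i (i+1))

def longest_common_list (s_list : List Int) : List Int :=
  let sublists_original := sublistA s_list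
  let sublists_reversed := sublistA s_list.reverse
  let common_sublists := sublists_original.flatMap
    (fun l1 => sublists_reversed.filterMap (fun l2 => if l1 = l2 then some l1 else none))
  (common_sublists.foldl
    (fun st l => if st.1 < l.length then (l.length, l) else st)
    ((0 : Nat), ([] : List Int))).2

-- ===== PORT B =====
-- helper `_occurs(seg, s)`: does the segment occur contiguously in s?
def occursB (seg s : List Int) : Bool :=
  (List.range (s.length - seg.length + 1)).any
    (fun k => decide ((s.drop k).take seg.length = seg))

-- the 'while' loop: extend j while the window s[i:j+1] stays non-decreasing and its
-- reverse occurs in s; returns the final j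
def extendB (s : List Int) (i j : Nat) : Nat :=
  if _h : j < s.length then
    if decide (s.getD (j-1) 0 ≤ s.getD j 0) &&
        occursB (((s.drop i).take (j+1-i)).reverse) s then
      extendB s i (j+1)
    else j
  else j
termination_by s.length - j

def longest_common_list_alt (s_list : List Int) : List Int :=
  (List.range s_list.length).foldl
    (fun best i =>
      let j := extendB s_list i (i+1)
      if max best.length 1 < j - i then (s_list.drop i).take (j - i) else best) []

-- ===== PRECONDITION & SPEC =====
def Spec_longest_common_list (s_list : List Int) (out : List Int) : Prop := out = longest_common_list_alt s_list
instance (s_list : List Int) (out : List Int) : Decidable (Spec_longest_common_list s_list out) := by unfold Spec_longest_common_list; infer_instance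

-- ===== CLAIM (what is proved, stated in full; the proofs are below) =====
def Claim_equal_longest_common_list : Prop := ∀ (s_list : List Int), Dom_longest_common_list s_list → Spec_longest_common_list s_list (longest_common_list s_list)

-- ===== LEMMAS AND PROOFS =====

-- windows are infixes
theorem win_infix (s : List Int) (i k : Nat) : (s.drop i).take k <:+: s := by
  exact ((List.take_prefix k (s.drop i)).isInfix).trans ((List.drop_suffix i s).isInfix)

-- `_occurs` is exactly infix-hood
theorem occursB_iff (seg s : List Int) : occursB seg s = true ↔ seg <:+: s := by
  constructor
  · intro h
    rcases List.any_eq_true.mp h with ⟨k, _, hk⟩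
    have hk' : (s.drop k).take seg.length = seg := by simpa using hk
    rw [← hk']
    exact win_infix s k seg.length
  · rintro ⟨a, c, rfl⟩
    apply List.any_eq_true.mpr
    refine ⟨a.length, List.mem_range.mpr ?_, ?_⟩
    · simp; omega
    · have h1 : (a ++ (seg ++ c)).drop a.length = seg ++ c := List.drop_left
      simp only [List.append_assoc, h1]
      simp

-- indexing inside a window
theorem win_getElem (s : List Int) (i e k : Nat) (hk : k < e - i) (hik : i + k < s.length) :
    ((s.drop i).take (e - i))[k]'(by simp [List.length_take, List.length_drop]; omega) = s[i+k]'hik := by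
  simp [List.getElem_take, List.getElem_drop]

-- the window is a chain when the adjacent pairs hold
theorem win_chain (s : List Int) (i e : Nat) (he : e ≤ s.length)
    (h : ∀ u, i < u → u < e → s.getD (u-1) 0 ≤ s.getD u 0) :
    List.IsChain (· ≤ ·) ((s.drop i).take (e - i)) := by
  rw [List.isChain_iff_getElem]
  intro k hk
  have hlen : ((s.drop i).take (e - i)).length = min (e - i) (s.length - i) := by
    simp [List.length_take, List.length_drop]
  rw [hlen] at hk
  have h1 : k + 1 < e - i := by omega
  have h2 : i + (k+1) < s.length := by omega
  have e1 := win_getElem s i e k (by omega) (by omega)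
  have e2 := win_getElem s i e (k+1) h1 h2
  rw [e1, e2]
  have := h (i+k+1) (by omega) (by omega)
  rw [List.getD_eq_getElem s 0 (show i+k+1-1 < s.length by omega),
      List.getD_eq_getElem s 0 (show i+k+1 < s.length by omega)] at this
  have harg : i + k + 1 - 1 = i + k := by omega
  simp only [harg] at this
  exact this

-- and conversely the pairs hold when the window is a chain
theorem chain_win (s : List Int) (i e : Nat) (he : e ≤ s.length) (hie : i ≤ e)
    (h : List.IsChain (· ≤ ·) ((s.drop i).take (e - i))) :
    ∀ u, i < u → u < e → s.getD (u-1) 0 ≤ s.getD u 0 := by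
  intro u hu1 hu2
  rw [List.isChain_iff_getElem] at h
  have hu3 : u < s.length := by omega
  have hk : (u - 1 - i) + 1 < ((s.drop i).take (e - i)).length := by
    simp [List.length_take, List.length_drop]; omega
  have := h (u - 1 - i) hk
  have e1 := win_getElem s i e (u-1-i) (by omega) (by omega)
  have e2 := win_getElem s i e (u-1-i+1) (by omega) (by omega)
  rw [e1, e2] at this
  rw [List.getD_eq_getElem s 0 (show u-1 < s.length by omega),
      List.getD_eq_getElem s 0 hu3]
  convert this using 2 <;> omega

-- members of A's inner generator loop are windows with their adjacent pairs holding
theorem mem_subAuxA (t : List Int) (i : Nat) (l : List Int) :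
    ∀ (n j : Nat), t.length - j ≤ n → l ∈ subAuxA t i j →
      ∃ e, j < e ∧ e ≤ t.length ∧ l = (t.drop i).take (e - i) ∧
        (∀ u, j ≤ u → u < e → t.getD (u-1) 0 ≤ t.getD u 0) := by
  intro n
  induction n with
  | zero =>
      intro j hn hl
      rw [subAuxA] at hl
      have : ¬ j < t.length := by omega
      simp [this] at hl
  | succ n ih =>
      intro j hn hl
      rw [subAuxA] at hl
      by_cases h : j < t.length
      · by_cases hc : t.getD (j-1) 0 ≤ t.getD j 0
        · rw [dif_pos h, if_pos hc] at hl
          rcases List.mem_cons.mp hl with h1 | h1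
          · refine ⟨j+1, by omega, by omega, h1, ?_⟩
            intro u h2 h3
            have hu : u = j := by omega
            subst hu; exact hc
          · rcases ih (j+1) (by omega) h1 with ⟨e, he1, he2, he3, he4⟩
            refine ⟨e, by omega, he2, he3, ?_⟩
            intro u h2 h3
            by_cases hu : u = j
            · subst hu; exact hc
            · exact he4 u (by omega) h3
        · rw [dif_pos h, if_neg hc] at hl
          simp at hl
      · rw [dif_neg h] at hl
        simp at hl

-- a chain window of length ≥ 2 is generated
theorem win_mem_subAuxA (t : List Int) (i e : Nat) (he : e ≤ t.length)
    (hch : ∀ u, i < u → u < e → t.getD (u-1) 0 ≤ t.getD u 0) :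
    ∀ (d j : Nat), e - j ≤ d → i < j → j < e →
      (t.drop i).take (e - i) ∈ subAuxA t i j := by
  intro d
  induction d with
  | zero => intro j hd hij hje; omega
  | succ d ih =>
      intro j hd hij hje
      have hjlen : j < t.length := by omega
      have hp : t.getD (j-1) 0 ≤ t.getD j 0 := hch j hij hje
      rw [subAuxA, dif_pos hjlen, if_pos hp]
      by_cases hend : e = j + 1
      · subst hend; exact List.mem_cons_self
      · exact List.mem_cons_of_mem _ (ih (j+1) (by omega) (by omega) (by omega))

-- the characterisation: A's generator yields exactly the non-decreasing infixes of length ≥ 2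
theorem mem_sublistA_iff (t l : List Int) :
    l ∈ sublistA t ↔ 2 ≤ l.length ∧ List.IsChain (· ≤ ·) l ∧ l <:+: t := by
  constructor
  · intro hl
    rcases List.mem_flatMap.mp hl with ⟨i, hi, hmem⟩
    have hi' : i < t.length := List.mem_range.mp hi
    rcases mem_subAuxA t i l (t.length - (i+1)) (i+1) (by omega) hmem with ⟨e, he1, he2, he3, he4⟩
    have hlen : l.length = e - i := by
      rw [he3]; simp [List.length_take, List.length_drop]; omega
    refine ⟨by omega, ?_, ?_⟩
    · rw [he3]
      exact win_chain t i e he2 (fun u h1 h2 => he4 u (by omega) h2)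
    · rw [he3]; exact win_infix t i (e - i)
  · rintro ⟨h2, hch, a, c, rfl⟩
    apply List.mem_flatMap.mpr
    refine ⟨a.length, List.mem_range.mpr (by simp; omega), ?_⟩
    have hwin : ((a ++ l ++ c).drop a.length).take ((a.length + l.length) - a.length) = l := by
      simp only [List.append_assoc, List.drop_left]
      have : a.length + l.length - a.length = l.length := by omega
      rw [this, List.take_left]
    have hch' : ∀ u, a.length < u → u < a.length + l.length →
        (a ++ l ++ c).getD (u-1) 0 ≤ (a ++ l ++ c).getD u 0 := by
      apply chain_win _ _ _ (by simp only [List.length_append]; omega) (by omega)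
      rw [hwin]; exact hch
    have := win_mem_subAuxA (a ++ l ++ c) a.length (a.length + l.length)
      (by simp only [List.length_append]; omega) hch' (a.length + l.length) (a.length + 1) (by omega) (by omega) (by omega)
    rwa [hwin] at this

-- A's (length, best) fold keeps first component = length of second
theorem foldA_eq (L : List (List Int)) (b : List Int) :
    L.foldl (fun st l => if st.1 < l.length then (l.length, l) else st) (b.length, b) =
      ((L.foldl (fun b l => if b.length < l.length then l else b) b).length,
        L.foldl (fun b l => if b.length < l.length then l else b) b) := by
  induction L generalizing b with
  | nil => rfl
  | cons l L ih =>
      simp only [List.foldl_cons]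
      by_cases h : b.length < l.length <;> simp [h, ih]

theorem chunk_eq_replicate (sr : List (List Int)) (l1 : List Int) :
    sr.filterMap (fun l2 => if l1 = l2 then some l1 else none) =
      List.replicate (sr.count l1) l1 := by
  induction sr with
  | nil => rfl
  | cons l2 sr ih =>
      by_cases h : l1 = l2
      · subst h; simp [ih, List.replicate_succ]
      · have h' : ¬ (l2 = l1) := fun hh => h hh.symm
        simp [h, ih, h']

theorem foldF_replicate (k : Nat) (b l : List Int) :
    (List.replicate k l).foldl (fun b l => if b.length < l.length then l else b) b =
      if k = 0 then b else (if b.length < l.length then l else b) := by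
  induction k generalizing b with
  | zero => rfl
  | succ k ih =>
      simp only [List.replicate_succ, List.foldl_cons, ih]
      by_cases hb : b.length < l.length <;> by_cases hk : k = 0 <;> simp [hb, hk]

theorem foldl_flatMap' {α β γ : Type} (g : α → List β) (f : γ → β → γ) (l : List α) (b : γ) :
    (l.flatMap g).foldl f b = l.foldl (fun b a => (g a).foldl f b) b := by
  induction l generalizing b with
  | nil => rfl
  | cons a l ih => simp [List.flatMap_cons, List.foldl_append, ih]

theorem foldl_ext' {α β : Type} (f g : β → α → β) (b : β) (l : List α)
    (h : ∀ x ∈ l, ∀ b, f b x = g b x) : l.foldl f b = l.foldl g b := by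
  induction l generalizing b with
  | nil => rfl
  | cons a l ih =>
      rw [List.foldl_cons, List.foldl_cons, h a (List.mem_cons_self) b]
      exact ih _ (fun x hx b => h x (List.mem_cons_of_mem _ hx) b)

-- A reduced to a first-longest fold with a membership test
theorem key_fold (so sr : List (List Int)) :
    ((so.flatMap (fun l1 => sr.filterMap (fun l2 => if l1 = l2 then some l1 else none))).foldl
        (fun st l => if st.1 < l.length then (l.length, l) else st) ((0:Nat), ([]:List Int))).2
      = so.foldl (fun b l => if b.length < l.length && decide (l ∈ sr) then l else b) [] := by
  have h0 : ((0:Nat), ([]:List Int)) = (([]:List Int).length, ([]:List Int)) := rfl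
  rw [h0, foldA_eq, foldl_flatMap']
  dsimp only
  apply foldl_ext'
  intro l1 _ b
  rw [chunk_eq_replicate, foldF_replicate]
  by_cases hm : l1 ∈ sr
  · have hcnt : sr.count l1 ≠ 0 := by simpa [List.count_eq_zero] using hm
    simp [hcnt, hm]
  · have hcnt : sr.count l1 = 0 := List.count_eq_zero.mpr hm
    simp [hcnt, hm]

theorem extendB_ge (s : List Int) (i : Nat) : ∀ (n j : Nat), s.length - j ≤ n → j ≤ extendB s i j := by
  intro n
  induction n with
  | zero =>
      intro j hn
      rw [extendB]
      have : ¬ j < s.length := by omega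
      simp [this]
  | succ n ih =>
      intro j hn
      rw [extendB]
      by_cases h : j < s.length
      · rw [dif_pos h]
        split
        · have := ih (j+1) (by omega)
          omega
        · omega
      · rw [dif_neg h]

-- once the window's condition fails, every later window also fails, so the fold is inert
theorem tail_eq (s : List Int) (i : Nat) (p : List Int → Bool) :
    ∀ (n j : Nat) (b : List Int), s.length - j ≤ n →
      (∀ e, j < e → p ((s.drop i).take (e - i)) = false) →
      (subAuxA s i j).foldl (fun b l => if b.length < l.length && p l then l else b) b = b := by
  intro n
  induction n with
  | zero =>
      intro j b hn hp
      rw [subAuxA]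
      have : ¬ j < s.length := by omega
      simp [this]
  | succ n ih =>
      intro j b hn hp
      rw [subAuxA]
      by_cases h : j < s.length
      · by_cases hc : s.getD (j-1) 0 ≤ s.getD j 0
        · rw [dif_pos h, if_pos hc, List.foldl_cons]
          have hpj : p ((s.drop i).take (j+1-i)) = false := hp (j+1) (by omega)
          rw [hpj]
          simp only [Bool.and_false, if_neg (by simp : ¬ (false = true))]
          exact ih (j+1) b (by omega) (fun e he => hp e (by omega))
        · rw [dif_pos h, if_neg hc]; rfl
      · rw [dif_neg h]; rfl

-- the per-start lemma: A's inner fold over the generated windows equals B's greedy update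
theorem inner_eq (s : List Int) (i : Nat) :
    ∀ (n j : Nat) (b : List Int), s.length - j ≤ n → i < j →
      (∀ u, i < u → u < j → s.getD (u-1) 0 ≤ s.getD u 0) →
      (j = i + 1 ∨ j - i ≤ max b.length 1) →
      (subAuxA s i j).foldl
          (fun b l => if b.length < l.length && decide (l ∈ sublistA s.reverse) then l else b) b
        = (if max b.length 1 < extendB s i j - i
            then (s.drop i).take (extendB s i j - i) else b) := by
  intro n
  induction n with
  | zero =>
      intro j b hn hij hA hB
      have hj : ¬ j < s.length := by omega
      rw [subAuxA, extendB, dif_neg hj, dif_neg hj]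
      simp only [List.foldl_nil]
      rw [if_neg (by omega)]
  | succ n ih =>
      intro j b hn hij hA hB
      rw [subAuxA, extendB]
      by_cases hj : j < s.length
      · rw [dif_pos hj, dif_pos hj]
        by_cases hc : s.getD (j-1) 0 ≤ s.getD j 0
        · rw [if_pos hc]
          set w := (s.drop i).take (j+1-i) with hw
          have hwlen : w.length = j+1-i := by
            rw [hw]; simp only [List.length_take, List.length_drop]; omega
          by_cases ho : occursB (((s.drop i).take (j+1-i)).reverse) s = true
          · have hcond : (decide (s.getD (j-1) 0 ≤ s.getD j 0) &&
                occursB (((s.drop i).take (j+1-i)).reverse) s) = true := by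
              rw [ho, Bool.and_true]; exact decide_eq_true hc
            rw [if_pos hcond]
            have hwmem : w ∈ sublistA s.reverse := by
              rw [mem_sublistA_iff]
              refine ⟨by omega, ?_, ?_⟩
              · exact win_chain s i (j+1) (by omega)
                  (fun u h1 h2 => by
                    by_cases hu : u < j
                    · exact hA u h1 hu
                    · have : u = j := by omega
                      subst this; exact hc)
              · have h1 : w.reverse <:+: s := (occursB_iff _ _).mp ho
                have h2 := List.reverse_infix.mpr h1
                simpa using h2
            rw [List.foldl_cons]
            simp only [decide_eq_true hwmem, Bool.and_true, decide_eq_true_eq]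
            have hE : j + 1 ≤ extendB s i (j+1) :=
              extendB_ge s i (s.length - (j+1)) (j+1) (le_refl _)
            have hA' : ∀ u, i < u → u < j+1 → s.getD (u-1) 0 ≤ s.getD u 0 := by
              intro u h1 h2
              by_cases hu : u < j
              · exact hA u h1 hu
              · have : u = j := by omega
                subst this; exact hc
            by_cases hb : b.length < w.length
            · rw [if_pos hb,
                  ih (j+1) w (by omega) (by omega) hA' (Or.inr (by omega))]
              by_cases hEq : extendB s i (j+1) = j + 1
              · rw [hEq, if_neg (by omega), if_pos (by omega)]
              · rw [if_pos (by omega), if_pos (by omega)]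
            · rw [if_neg hb,
                  ih (j+1) b (by omega) (by omega) hA' (Or.inr (by omega))]
          · have hcond : ¬ ((decide (s.getD (j-1) 0 ≤ s.getD j 0) &&
                occursB (((s.drop i).take (j+1-i)).reverse) s) = true) := by
              rw [eq_false_of_ne_true ho, Bool.and_false]; simp
            rw [if_neg hcond]
            have hnot : w ∉ sublistA s.reverse := by
              intro hmem
              rcases (mem_sublistA_iff _ _).mp hmem with ⟨_, _, hinf⟩
              exact ho ((occursB_iff _ _).mpr (by simpa using List.reverse_infix.mpr hinf))
            rw [List.foldl_cons]
            simp only [decide_eq_false hnot, Bool.and_false, Bool.false_eq_true, if_false]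
            rw [tail_eq s i _ n (j+1) b (by omega) ?_, if_neg (by omega)]
            intro e he
            apply decide_eq_false
            intro hmem
            rcases (mem_sublistA_iff _ _).mp hmem with ⟨_, _, hinf⟩
            have hpre : w <+: (s.drop i).take (e - i) := by
              have h3 := List.take_prefix (j+1-i) ((s.drop i).take (e-i))
              rwa [List.take_take, min_eq_left (by omega : j+1-i ≤ e-i)] at h3
            exact ho ((occursB_iff _ _).mpr
              (by simpa using List.reverse_infix.mpr (hpre.isInfix.trans hinf)))
        · have hcond : ¬ ((decide (s.getD (j-1) 0 ≤ s.getD j 0) &&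
              occursB (((s.drop i).take (j+1-i)).reverse) s) = true) := by
            simp only [Bool.and_eq_true, decide_eq_true_eq]
            intro hfalse
            exact absurd hfalse.1 hc
          rw [if_neg hc, if_neg hcond]
          simp only [List.foldl_nil]
          rw [if_neg (by omega)]
      · rw [dif_neg hj, dif_neg hj]
        simp only [List.foldl_nil]
        rw [if_neg (by omega)]

theorem main_eq (s : List Int) : longest_common_list s = longest_common_list_alt s := by
  have hL : longest_common_list s =
      (((sublistA s).flatMap (fun l1 => (sublistA s.reverse).filterMap
          (fun l2 => if l1 = l2 then some l1 else none))).foldl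
        (fun st l => if st.1 < l.length then (l.length, l) else st) ((0:Nat), ([]:List Int))).2 := rfl
  rw [hL, key_fold,
      show (sublistA s) = (List.range s.length).flatMap (fun i => subAuxA s i (i+1)) from rfl,
      foldl_flatMap']
  rw [longest_common_list_alt]
  apply foldl_ext'
  intro i _ b
  exact inner_eq s i (s.length - (i+1)) (i+1) b (le_refl _) (by omega)
    (fun u h1 h2 => absurd h2 (by omega)) (Or.inl rfl)

-- ===== VERDICT (by name: the statement is the Claim_ definition above) =====
theorem longest_common_list_spec : Claim_equal_longest_common_list := by
  intro s _
  exact main_eq s
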